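-- pv_equiv track=rewrite | github.com/matthew-david-hawkins/Xref_Key | app.py | strip_scp
-- ===== SOURCE A (Python) =====
-- def strip_scp(my_string):
--
--     # Find everything left off the semicolon
--     scolon = my_string.find(":")
--
--     # If no semicolon is found, return a blank
--     if scolon == -1:
--
--         return ""
--
--     else:
--
--         scolon_left = my_string[0:scolon]
--
--         # Reverse the string to perform find in backward direction
--         str_reversed =''.join(reversed(scolon_left))
--
--         # Define special characters to search for
--         characters = ['(', ')', " ", '+', "-","*","/","^", "'"]
--
--         # Find the first instance of a special character
--         finds = []
--         for character in characters:
--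
--             finds.append(str_reversed.find(character))
--
--         # Remove -1 from list
--         finds = list(filter(lambda a: a != -1, finds))
--
--         # Get everything up to the first special character
--         if finds:
--             mystr = str_reversed[0:min(finds)]
--         else:
--             mystr = str_reversed
--
--         # Reverse to return to normal order
--         compound =''.join(reversed(mystr))
--
--
--         # Find everything right of the semicolon
--         scolon_right = my_string[scolon:]
--
--         # Find the first instance of a special character
--         finds = []
--         for character in characters:
--
--             finds.append(scolon_right.find(character))
--
--         # Remove -1 from list
--         finds = list(filter(lambda a: a != -1, finds))
--
--         if finds:
--             block_param = scolon_right[:min(finds)]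
--         else:
--             block_param = scolon_right
--
--         scp_key = compound + block_param
--
--         return scp_key
-- ===== SOURCE B (Python) =====
-- SPECIAL = set("() +-*/^'")
--
-- def _take_until_special(chars):
--     out = []
--     for c in chars:
--         if c in SPECIAL:
--             break
--         out.append(c)
--     return out
--
-- def strip_scp(my_string):
--     scolon = my_string.find(":")
--     if scolon == -1:
--         return ""
--     left = my_string[:scolon]
--     right = my_string[scolon:]
--     # backward piece of the left half: take-until-special on the reversed left, restored
--     lpiece = ''.join(reversed(_take_until_special(reversed(left))))
--     rpiece = ''.join(_take_until_special(right))
--     return lpiece + rpiece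
-- ===== Notes on version B (the rewrite author's own statement) =====
-- stated objective: simpler
-- what changed: Replaces the reverse-join, nine separate str.find calls, filter of -1 and min-over-finds blocks (done twice) by one shared single-pass take-until-special-character scan applied to the reversed left half and to the right half.
import Mathlib
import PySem

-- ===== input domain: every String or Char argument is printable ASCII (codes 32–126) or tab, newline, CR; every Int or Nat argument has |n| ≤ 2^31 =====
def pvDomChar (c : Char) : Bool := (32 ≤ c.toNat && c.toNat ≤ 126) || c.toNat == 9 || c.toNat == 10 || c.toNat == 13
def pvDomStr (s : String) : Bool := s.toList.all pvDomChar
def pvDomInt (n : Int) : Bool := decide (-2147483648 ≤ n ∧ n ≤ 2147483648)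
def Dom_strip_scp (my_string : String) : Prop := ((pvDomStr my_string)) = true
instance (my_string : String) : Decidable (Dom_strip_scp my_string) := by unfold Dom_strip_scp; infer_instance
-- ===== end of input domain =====

-- B replaces A's nine-finds/filter/min block (done twice) by a single take-until-special scan; objective: simpler.


-- ===== PORT A =====
-- the list 'characters' of A (each entry a one-character Python string)
def pvCharacters : List (List Char) := [['('], [')'], [' '], ['+'], ['-'], ['*'], ['/'], ['^'], ['\'']]

-- A repeats an identical block verbatim for both halves (nine finds, filter out -1,
-- slice up to min(finds) if any); it is transliterated once here and applied twice.
def pvAKeep (s : List Char) : List Char :=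
  let finds := pvCharacters.map (fun character => PySem.Chars.find s character)
  let finds := finds.filter (fun a => a ≠ -1)
  match PySem.List.min? finds (fun x => x) with
  | some m => PySem.List.slice s (some 0) (some m)
  | none => s

def strip_scp (my_string : String) : String :=
  let cs := my_string.toList
  let scolon := PySem.Chars.find cs [':']
  if scolon = -1 then ""
  else
    let scolon_left := PySem.List.slice cs (some 0) (some scolon)
    let str_reversed := scolon_left.reverse
    let mystr := pvAKeep str_reversed
    let compound := mystr.reverse
    let scolon_right := PySem.List.slice cs (some scolon) none
    let block_param := pvAKeep scolon_right
    String.ofList (compound ++ block_param)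

-- ===== PORT B =====
def pvSpecial (c : Char) : Bool := c ∈ ['(', ')', ' ', '+', '-', '*', '/', '^', '\'']

def pvTakeUntilSpecial : List Char → List Char
  | [] => []
  | c :: rest => if pvSpecial c then [] else c :: pvTakeUntilSpecial rest

def strip_scp_alt (my_string : String) : String :=
  let cs := my_string.toList
  let scolon := PySem.Chars.find cs [':']
  if scolon = -1 then ""
  else
    let left := PySem.List.slice cs (some 0) (some scolon)
    let right := PySem.List.slice cs (some scolon) none
    String.ofList ((pvTakeUntilSpecial left.reverse).reverse ++ pvTakeUntilSpecial right)

-- ===== PRECONDITION & SPEC =====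
def Spec_strip_scp (my_string : String) (out : String) : Prop := out = strip_scp_alt my_string
instance (my_string : String) (out : String) : Decidable (Spec_strip_scp my_string out) := by unfold Spec_strip_scp; infer_instance

-- ===== CLAIM (what is proved, stated in full; the proofs are below) =====
def Claim_equal_strip_scp : Prop := ∀ (my_string : String), Dom_strip_scp my_string → Spec_strip_scp my_string (strip_scp my_string)

-- ===== LEMMAS AND PROOFS =====

theorem pv_go_ge (sub s : List Char) (k : Nat) :
    PySem.Chars.find.go sub s k = -1 ∨ (k : Int) ≤ PySem.Chars.find.go sub s k := by
  induction s generalizing k with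
  | nil =>
    simp only [PySem.Chars.find.go]
    split <;> simp
  | cons h t ih =>
    simp only [PySem.Chars.find.go]
    split
    · right; simp
    · rcases ih (k + 1) with h1 | h1
      · left; exact h1
      · right; omega

theorem pv_go_cons (sub : List Char) (h : Char) (t : List Char) (k : Nat) :
    PySem.Chars.find.go sub (h :: t) k =
      if sub.isPrefixOf (h :: t) = true then (k : Int) else PySem.Chars.find.go sub t (k + 1) := by
  simp [PySem.Chars.find.go]

theorem pv_go_shift (sub s : List Char) (k : Nat) (hsub : sub ≠ []) :
    PySem.Chars.find.go sub s k =
      if PySem.Chars.find.go sub s 0 = -1 then -1 else PySem.Chars.find.go sub s 0 + k := by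
  induction s generalizing k with
  | nil =>
    simp [PySem.Chars.find.go, List.isEmpty_iff, hsub]
  | cons h t ih =>
    rw [pv_go_cons, pv_go_cons]
    by_cases hp : sub.isPrefixOf (h :: t) = true
    · simp [hp]
    · simp only [hp]
      rw [ih (k + 1), Nat.zero_add, ih 1]
      by_cases h0 : PySem.Chars.find.go sub t 0 = -1
      · simp [h0]
      · have hge : (0 : Int) ≤ PySem.Chars.find.go sub t 0 := by
          rcases pv_go_ge sub t 0 with h | h
          · exact absurd h h0
          · simpa using h
        split_ifs <;> omega

theorem pv_find_ge (s sub : List Char) : -1 ≤ PySem.Chars.find s sub := by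
  unfold PySem.Chars.find
  rcases pv_go_ge sub s 0 with h | h <;> omega

theorem pv_find_cons (h : Char) (t : List Char) (c : Char) :
    PySem.Chars.find (h :: t) [c] =
      if c = h then 0
      else if PySem.Chars.find t [c] = -1 then -1 else PySem.Chars.find t [c] + 1 := by
  unfold PySem.Chars.find
  rw [show PySem.Chars.find.go [c] (h :: t) 0 =
        if [c].isPrefixOf (h :: t) = true then (0 : Int) else PySem.Chars.find.go [c] t 1
      from by simp [PySem.Chars.find.go]]
  have hp : ([c].isPrefixOf (h :: t) = true) ↔ c = h := by
    simp [List.isPrefixOf]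
  by_cases hc : c = h
  · simp [hc]
  · simp only [hp, hc, if_false]
    rw [pv_go_shift [c] t 1 (by simp)]
    push_cast; rfl

theorem pv_find_cons_head (h : Char) (t : List Char) :
    PySem.Chars.find (h :: t) [h] = 0 := by
  rw [pv_find_cons]; simp

theorem pv_filter_shift (xs : List Int) (hx : ∀ v ∈ xs, -1 ≤ v) :
    (xs.map (fun v => if v = -1 then -1 else v + 1)).filter (fun a => a ≠ -1) =
      (xs.filter (fun a => a ≠ -1)).map (· + 1) := by
  induction xs with
  | nil => rfl
  | cons x xs ih =>
    have hxx : -1 ≤ x := hx x (by simp)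
    have ih' := ih (fun v hv => hx v (List.mem_cons_of_mem _ hv))
    simp only [List.map_cons, List.filter_cons]
    by_cases h1 : x = -1
    · simp only [h1]
      simpa using ih'
    · have h2 : ¬ (x + 1 = -1) := by omega
      simpa [h1, h2] using ih'

theorem pv_foldl_min_shift (t : List Int) (x : Int) :
    (t.map (· + 1)).foldl min (x + 1) = t.foldl min x + 1 := by
  induction t generalizing x with
  | nil => rfl
  | cons y t ih =>
    simp only [List.map_cons, List.foldl_cons]
    rw [min_add_add_right]
    exact ih (min x y)

theorem pv_min?_map_shift (xs : List Int) :
    PySem.List.min? (xs.map (· + 1)) (fun x => x) =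
      (PySem.List.min? xs (fun x => x)).map (· + 1) := by
  cases xs with
  | nil => rfl
  | cons x t =>
    rw [List.map_cons, PySem.List.min?_id_cons, PySem.List.min?_id_cons]
    simp [pv_foldl_min_shift t x]

theorem pv_min?_some_of_ne_nil (xs : List Int) (h : xs ≠ []) :
    ∃ m, PySem.List.min? xs (fun x => x) = some m := by
  unfold PySem.List.min?
  cases xs with
  | nil => exact absurd rfl h
  | cons x t =>
    simp only [List.foldl_cons]
    clear h
    induction t generalizing x with
    | nil => exact ⟨x, rfl⟩
    | cons y t ih =>
      simp only [List.foldl_cons]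
      by_cases hy : y < x
      · simpa [hy] using ih y
      · simpa [hy] using ih x

theorem pv_special_mem (c : Char) (hc : pvSpecial c = true) : [c] ∈ pvCharacters := by
  simp only [pvSpecial, List.mem_cons, List.not_mem_nil, or_false, decide_eq_true_eq] at hc
  rcases hc with h | h | h | h | h | h | h | h | h <;> subst h <;> simp [pvCharacters]

theorem pv_characters_special (t : List Char) (ht : t ∈ pvCharacters) :
    ∃ d, t = [d] ∧ pvSpecial d = true := by
  simp only [pvCharacters, List.mem_cons, List.not_mem_nil, or_false] at ht
  rcases ht with h | h | h | h | h | h | h | h | h <;> subst h <;>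
    exact ⟨_, rfl, by decide⟩

theorem pv_slice_take (s : List Char) (m : Int) (hm : 0 ≤ m) :
    PySem.List.slice s (some 0) (some m) = s.take m.toNat := by
  rw [PySem.List.slice_zero_start, PySem.List.slice_to s hm]

theorem pvAKeep_eq (s : List Char) : pvAKeep s = pvTakeUntilSpecial s := by
  induction s with
  | nil => rfl
  | cons c rest ih =>
    by_cases hc : pvSpecial c = true
    · -- head is special: min of the finds is 0
      have hmem0 : (0 : Int) ∈
          (pvCharacters.map (fun ch => PySem.Chars.find (c :: rest) ch)).filter
            (fun a => a ≠ -1) := by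
        rw [List.mem_filter]
        refine ⟨List.mem_map.2 ⟨[c], pv_special_mem c hc, pv_find_cons_head c rest⟩, by decide⟩
      unfold pvAKeep
      obtain ⟨m, hmin⟩ := pv_min?_some_of_ne_nil _ (List.ne_nil_of_mem hmem0)
      have hle := PySem.List.min?_isMin hmin 0 hmem0
      have hmem := PySem.List.min?_mem hmin
      rw [List.mem_filter] at hmem
      obtain ⟨hmm, hne⟩ := hmem
      obtain ⟨t, ht, hfind⟩ := List.mem_map.1 hmm
      have hge : -1 ≤ m := hfind ▸ pv_find_ge (c :: rest) t
      have hne' : m ≠ -1 := by simpa using hne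
      have hm0 : m = 0 := by simp only [] at hle; omega
      subst hm0
      simp only [hmin]
      rw [pv_slice_take _ 0 le_rfl]
      simp [pvTakeUntilSpecial, hc]
    · -- head not special: every find shifts by one
      have hmap : pvCharacters.map (fun ch => PySem.Chars.find (c :: rest) ch) =
          (pvCharacters.map (fun ch => PySem.Chars.find rest ch)).map
            (fun v => if v = -1 then -1 else v + 1) := by
        rw [List.map_map]
        refine List.map_congr_left (fun t ht => ?_)
        obtain ⟨d, rfl, hd⟩ := pv_characters_special t ht
        have hdc : d ≠ c := fun h => hc (h ▸ hd)
        simp only [Function.comp_apply]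
        rw [pv_find_cons c rest d, if_neg hdc]
      have hfilter :
          ((pvCharacters.map (fun ch => PySem.Chars.find (c :: rest) ch)).filter
              (fun a => a ≠ -1)) =
            ((pvCharacters.map (fun ch => PySem.Chars.find rest ch)).filter
              (fun a => a ≠ -1)).map (· + 1) := by
        rw [hmap]
        refine pv_filter_shift _ ?_
        intro v hv
        obtain ⟨t, _, hfd⟩ := List.mem_map.1 hv
        exact hfd ▸ pv_find_ge rest t
      unfold pvAKeep
      unfold pvAKeep at ih
      simp only [hfilter, pv_min?_map_shift]
      rcases hmin : PySem.List.min?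
          ((pvCharacters.map (fun ch => PySem.Chars.find rest ch)).filter
            (fun a => a ≠ -1)) (fun x => x) with _ | m
      · simp only [hmin, Option.map_none] at *
        simp [pvTakeUntilSpecial, hc, ← ih]
      · have hmem := PySem.List.min?_mem hmin
        rw [List.mem_filter] at hmem
        obtain ⟨hmm, hne⟩ := hmem
        obtain ⟨t, _, hfind⟩ := List.mem_map.1 hmm
        have hge : -1 ≤ m := hfind ▸ pv_find_ge rest t
        have hm0 : 0 ≤ m := by
          have : m ≠ -1 := by simpa using hne
          omega
        simp only [hmin, Option.map_some] at *
        rw [pv_slice_take _ (m + 1) (by omega)]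
        rw [pv_slice_take _ m hm0] at ih
        have htn : (m + 1).toNat = m.toNat + 1 := by omega
        rw [htn, List.take_succ_cons]
        simp [pvTakeUntilSpecial, hc, ← ih]

-- ===== VERDICT (by name: the statement is the Claim_ definition above) =====
theorem strip_scp_spec : Claim_equal_strip_scp := by
  intro my_string _
  unfold Spec_strip_scp strip_scp strip_scp_alt
  by_cases h : PySem.Chars.find my_string.toList [':'] = -1
  · simp [h]
  · simp only [h, if_false]
    rw [pvAKeep_eq, pvAKeep_eq]
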